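-- pv_equiv track=rewrite | github.com/Sayeem2004/CodingBat | Python/p232103.py | noConsecutiveCapsSpecial
-- ===== SOURCE A (Python) =====
-- def noConsecutiveCapsSpecial(s):
--   x = 0
--   y = 1
--   for i in s:
--     if y == 0:
--       if 91 > ord(i) > 64:
--         x = x + 1
--       else:
--         if x == 0:
--           x = 0
--         else:
--           x = x - 1
--     else:
--       y = 0
--     if x == 2:
--       return False
--   return True
-- ===== SOURCE B (Python) =====
-- def noConsecutiveCapsSpecial(s):
--   return not any(64 < ord(a) < 91 and 64 < ord(b) < 91
--                  for a, b in zip(s[1:], s[2:]))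
-- ===== Notes on version B (the rewrite author's own statement) =====
-- stated objective: simpler
-- what changed: Replaces the clamped counter/skip-flag state machine with a direct pairwise scan: B checks whether any two adjacent characters of s[1:] are both ASCII uppercase.
import Mathlib
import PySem

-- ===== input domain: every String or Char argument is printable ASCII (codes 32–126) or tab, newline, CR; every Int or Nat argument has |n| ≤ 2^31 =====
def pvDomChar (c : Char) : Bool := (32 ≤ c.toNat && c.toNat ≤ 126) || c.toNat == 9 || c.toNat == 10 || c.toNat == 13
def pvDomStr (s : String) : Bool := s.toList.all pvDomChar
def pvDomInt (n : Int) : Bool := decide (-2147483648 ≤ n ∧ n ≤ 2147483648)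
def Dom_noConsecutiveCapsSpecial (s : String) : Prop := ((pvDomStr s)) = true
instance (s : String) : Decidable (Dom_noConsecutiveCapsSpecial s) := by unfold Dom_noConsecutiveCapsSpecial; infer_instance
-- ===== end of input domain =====

-- B replaces A's clamped counter/skip-flag state machine with a direct adjacent-pair scan over s[1:]; return values only.

-- ===== PORT A =====
-- loop of A: state x (counter) and y (first-iteration flag); early return False when x hits 2
def pvGoA : List Char → Int → Int → Bool
  | [], _, _ => true
  | c :: rest, x, y =>
    if y == 0 then
      let x' : Int := if 91 > (c.toNat : Int) ∧ (c.toNat : Int) > 64 then x + 1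
                      else if x == 0 then x else x - 1
      if x' == 2 then false else pvGoA rest x' y
    else
      if x == 2 then false else pvGoA rest x 0

def noConsecutiveCapsSpecial (s : String) : Bool := pvGoA s.toList 0 1

-- ===== PORT B =====
-- 64 < ord(c) < 91
def pvIsCap (c : Char) : Bool := 64 < (c.toNat : Int) && (c.toNat : Int) < 91
-- zip(s[1:], s[2:]) (nonnegative slices = drop), any adjacent uppercase pair
def noConsecutiveCapsSpecial_alt (s : String) : Bool :=
  !(((s.toList.drop 1).zip (s.toList.drop 2)).any (fun p => pvIsCap p.1 && pvIsCap p.2))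

-- ===== PRECONDITION & SPEC =====
def Spec_noConsecutiveCapsSpecial (s : String) (out : Bool) : Prop := out = noConsecutiveCapsSpecial_alt s
instance (s : String) (out : Bool) : Decidable (Spec_noConsecutiveCapsSpecial s out) := by unfold Spec_noConsecutiveCapsSpecial; infer_instance

-- ===== CLAIM (what is proved, stated in full; the proofs are below) =====
def Claim_equal_noConsecutiveCapsSpecial : Prop := ∀ (s : String), Dom_noConsecutiveCapsSpecial s → Spec_noConsecutiveCapsSpecial s (noConsecutiveCapsSpecial s)

-- ===== LEMMAS AND PROOFS =====

-- the bad-pair predicate over a char list: some adjacent pair of caps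
def pvBad (l : List Char) : Bool := (l.zip (l.drop 1)).any (fun p => pvIsCap p.1 && pvIsCap p.2)

theorem pvBad_cons (c : Char) (l : List Char) :
    pvBad (c :: l) = ((pvIsCap c && (match l with | [] => false | d :: _ => pvIsCap d)) || pvBad l) := by
  cases l with
  | nil => simp [pvBad]
  | cons d r => simp [pvBad]

theorem pvGoA_char : ∀ (l : List Char),
    (pvGoA l 0 0 = !pvBad l) ∧
    (pvGoA l 1 0 = !((match l with | [] => false | d :: _ => pvIsCap d) || pvBad l)) := by
  intro l
  induction l with
  | nil => constructor <;> simp [pvGoA, pvBad]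
  | cons c rest ih =>
    constructor
    · by_cases h : 91 > (c.toNat : Int) ∧ (c.toNat : Int) > 64
      · have hc : pvIsCap c = true := by
          simp [pvIsCap]; omega
        simp only [pvGoA, if_pos h]
        norm_num
        rw [ih.2, pvBad_cons, hc]
        cases rest <;> simp
      · have hc : pvIsCap c = false := by
          simp [pvIsCap]; omega
        simp only [pvGoA, if_neg h]
        norm_num
        rw [ih.1, pvBad_cons, hc]
        simp
    · by_cases h : 91 > (c.toNat : Int) ∧ (c.toNat : Int) > 64
      · have hc : pvIsCap c = true := by
          simp [pvIsCap]; omega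
        simp only [pvGoA, if_pos h]
        norm_num [hc]
      · have hc : pvIsCap c = false := by
          simp [pvIsCap]; omega
        simp only [pvGoA, if_neg h]
        norm_num
        rw [ih.1, pvBad_cons, hc]
        simp

theorem pvAB (s : String) : noConsecutiveCapsSpecial s = noConsecutiveCapsSpecial_alt s := by
  unfold noConsecutiveCapsSpecial noConsecutiveCapsSpecial_alt
  cases hl : s.toList with
  | nil => simp [pvGoA]
  | cons c tail =>
    have h1 : pvGoA (c :: tail) 0 1 = pvGoA tail 0 0 := by
      simp [pvGoA]
    rw [h1, (pvGoA_char tail).1]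
    have : (c :: tail).drop 1 = tail := rfl
    have h2 : (c :: tail).drop 2 = tail.drop 1 := rfl
    rw [this, h2]
    rfl

-- ===== VERDICT (by name: the statement is the Claim_ definition above) =====
theorem noConsecutiveCapsSpecial_spec : Claim_equal_noConsecutiveCapsSpecial := by
  intro s _
  unfold Spec_noConsecutiveCapsSpecial
  exact pvAB s
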